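-- pv_equiv track=rewrite | github.com/HeroCod/BPM-Project-final | edit.py | add_newline_after_comma
-- ===== SOURCE A (Python) =====
-- def add_newline_after_comma(data):
--     result = []
--     inside_quotes = False
--
--     for char in data:
--         if char == '"':
--             inside_quotes = not inside_quotes
--         if char == ',' and not inside_quotes:
--             result.append('~')
--         else:
--             result.append(char)
--
--     return ''.join(result)
-- ===== SOURCE B (Python) =====
-- def add_newline_after_comma(data):
--     parts = data.split('"')
--     out = []
--     for i, part in enumerate(parts):
--         out.append(part.replace(',', '~') if i % 2 == 0 else part)
--     return '"'.join(out)
-- ===== Notes on version B (the rewrite author's own statement) =====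
-- stated objective: idiomatic
-- what changed: Replaces the stateful per-character scan with a toggling inside-quotes flag by a split-on-quote / replace-commas-in-even-segments / rejoin pipeline.
import Mathlib
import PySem

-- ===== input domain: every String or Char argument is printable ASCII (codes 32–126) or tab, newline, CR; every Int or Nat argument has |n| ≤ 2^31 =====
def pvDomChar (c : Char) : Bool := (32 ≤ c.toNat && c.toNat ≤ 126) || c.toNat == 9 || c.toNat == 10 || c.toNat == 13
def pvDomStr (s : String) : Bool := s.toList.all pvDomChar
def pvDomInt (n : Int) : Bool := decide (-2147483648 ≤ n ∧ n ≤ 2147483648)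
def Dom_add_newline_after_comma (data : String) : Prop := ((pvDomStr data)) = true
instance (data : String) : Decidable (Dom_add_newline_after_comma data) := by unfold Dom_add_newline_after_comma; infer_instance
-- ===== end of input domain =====

-- B replaces A's stateful per-character scan (inside_quotes toggle) by split-on-'"',
-- replace ',' in the even-indexed (outside-quote) segments, rejoin — more idiomatic, same cost.

-- ===== PORT A =====
-- the loop body of A: state is (result, inside_quotes)
def pvStepA (st : List Char × Bool) (char : Char) : List Char × Bool :=
  let inside := if char == '"' then !st.2 else st.2
  if char == ',' && !inside then (st.1 ++ ['~'], inside) else (st.1 ++ [char], inside)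

-- ''.join over single-char strings = String.ofList
def add_newline_after_comma (data : String) : String :=
  String.ofList (data.toList.foldl pvStepA ([], false)).1

-- ===== PORT B =====
-- part.replace(',', '~') for one-char old/new is exactly a character-wise map
def pvRepComma (c : Char) : Char := if c == ',' then '~' else c

-- the 'for i, part in enumerate(parts): out.append(...)' loop of Source B
def pvSegLoop : Nat → List (List Char) → List (List Char)
  | _, [] => []
  | i, p :: ps => (if i % 2 == 0 then p.map pvRepComma else p) :: pvSegLoop (i + 1) ps

-- data.split('"') with a one-char separator is exactly List.splitOn '"';
-- '"'.join(out) is exactly List.intercalate ['"']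
def add_newline_after_comma_alt (data : String) : String :=
  String.ofList (List.intercalate ['"'] (pvSegLoop 0 (data.toList.splitOn '"')))

-- ===== PRECONDITION & SPEC =====
def Spec_add_newline_after_comma (data : String) (out : String) : Prop := out = add_newline_after_comma_alt data
instance (data : String) (out : String) : Decidable (Spec_add_newline_after_comma data out) := by unfold Spec_add_newline_after_comma; infer_instance

-- ===== CLAIM (what is proved, stated in full; the proofs are below) =====
def Claim_equal_add_newline_after_comma : Prop := ∀ (data : String), Dom_add_newline_after_comma data → Spec_add_newline_after_comma data (add_newline_after_comma data)

-- ===== LEMMAS AND PROOFS =====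

-- what A's scan produces, as a structural recursion on the characters (b = inside_quotes)
def pvScan : List Char → Bool → List Char
  | [], _ => []
  | c :: cs, b =>
    let b' := if c == '"' then !b else b
    (if c == ',' && !b' then '~' else c) :: pvScan cs b'

-- alternating segment transform: b = inside_quotes at the start of the first segment
def pvAltSegs : List (List Char) → Bool → List (List Char)
  | [], _ => []
  | p :: ps, b => (if b then p else p.map pvRepComma) :: pvAltSegs ps (!b)

theorem pvFoldA (cs : List Char) (acc : List Char) (b : Bool) :
    (cs.foldl pvStepA (acc, b)).1 = acc ++ pvScan cs b := by
  induction cs generalizing acc b with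
  | nil => simp [pvScan]
  | cons c cs ih =>
    have hstep : pvStepA (acc, b) c =
        (acc ++ [if c == ',' && !(if c == '"' then !b else b) then '~' else c],
          if c == '"' then !b else b) := by
      simp only [pvStepA]
      by_cases h1 : c = '"' <;> by_cases h2 : c = ',' <;> cases b <;> simp_all
    simp only [List.foldl_cons, hstep, ih]
    simp [pvScan]

theorem pvSegLoop_eq_alt (ps : List (List Char)) (i : Nat) :
    pvSegLoop i ps = pvAltSegs ps (!(i % 2 == 0)) := by
  induction ps generalizing i with
  | nil => rfl
  | cons p ps ih =>
    simp only [pvSegLoop, pvAltSegs, ih]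
    have h2 : ((i + 1) % 2 == 0) = !(i % 2 == 0) := by
      have := Nat.mod_two_eq_zero_or_one i
      rcases this with h | h <;> simp [h, Nat.add_mod]
    rw [h2]
    cases hm : (i % 2 == 0) <;> simp

theorem pvSplitOn_ne_nil (cs : List Char) : cs.splitOn '"' ≠ [] := by
  simp [List.splitOn]
  exact List.splitOnP_ne_nil _ _

-- cons on the head segment commutes through the join
theorem pvIntercalate_modifyHead (c : Char) (p : List Char) (ps : List (List Char)) :
    List.intercalate ['"'] ((c :: p) :: ps) = c :: List.intercalate ['"'] (p :: ps) := by
  cases ps with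
  | nil => simp [List.intercalate]
  | cons q qs => simp [List.intercalate]

theorem pvIntercalate_nil_cons (p : List Char) (ps : List (List Char)) :
    List.intercalate ['"'] ([] :: p :: ps) = '"' :: List.intercalate ['"'] (p :: ps) := by
  simp [List.intercalate]

-- the heart: A's scan from flag b equals join of the alternating transform of the split
theorem pvScan_eq_join (cs : List Char) (b : Bool) :
    pvScan cs b = List.intercalate ['"'] (pvAltSegs (cs.splitOn '"') b) := by
  induction cs generalizing b with
  | nil => cases b <;> simp [pvScan, pvAltSegs, List.intercalate]
  | cons c cs ih =>
    by_cases hq : c = '"'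
    · subst hq
      have hsplit : ('"' :: cs).splitOn '"' = [] :: cs.splitOn '"' := by
        simp [List.splitOn, List.splitOnP_cons]
      rw [hsplit]
      obtain ⟨q, qs, hq⟩ : ∃ q qs, cs.splitOn '"' = q :: qs := by
        cases h : cs.splitOn '"' with
        | nil => exact absurd h (pvSplitOn_ne_nil cs)
        | cons q qs => exact ⟨q, qs, rfl⟩
      have hchar : (('"' : Char) == ',') = false := by decide
      cases b <;>
        simp [pvScan, pvAltSegs, hq, hchar, pvIntercalate_nil_cons, ih, pvAltSegs]
    · have hsplit : (c :: cs).splitOn '"' = (cs.splitOn '"').modifyHead (c :: ·) := by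
        simp [List.splitOn, List.splitOnP_cons, hq]
      obtain ⟨q, qs, hq2⟩ : ∃ q qs, cs.splitOn '"' = q :: qs := by
        cases h : cs.splitOn '"' with
        | nil => exact absurd h (pvSplitOn_ne_nil cs)
        | cons q qs => exact ⟨q, qs, rfl⟩
      rw [hsplit, hq2]
      have hqb : (c == '"') = false := by simp [hq]
      have step : pvScan (c :: cs) b =
          (if c == ',' && !b then '~' else c) :: pvScan cs b := by
        simp [pvScan, hqb]
      rw [step, ih b, hq2]
      cases b <;>
        simp [pvAltSegs, pvIntercalate_modifyHead, pvRepComma]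

-- ===== VERDICT (by name: the statement is the Claim_ definition above) =====
theorem add_newline_after_comma_spec : Claim_equal_add_newline_after_comma := by
  intro data _
  unfold Spec_add_newline_after_comma add_newline_after_comma add_newline_after_comma_alt
  rw [pvFoldA, pvSegLoop_eq_alt]
  simp [pvScan_eq_join]
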